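-- pv_equiv track=rewrite | github.com/Impact931/Carousel-Engine-V2 | carousel_engine/services/openai_service.py | _parse_optimized_content
-- ===== SOURCE A (Python) =====
-- def _parse_optimized_content(content_text: str) -> list[str]:
--     """Parse GPT response into slide texts, filtering out unwanted content
--
--     Args:
--         content_text: GPT response text
--
--     Returns:
--         List of clean slide texts
--     """
--     slides = []
--     current_slide = []
--
--     # Filter out common unwanted phrases
--     unwanted_phrases = [
--         "here's your carousel",
--         "i'll create",
--         "let me craft",
--         "here are the slides",
--         "i've created",
--         "this carousel",
--         "here's how",
--         "let's break this down",
--         "i've optimized",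
--         "here's the content",
--         "based on your request"
--     ]
--
--     lines = content_text.split('\n')
--     for line in lines:
--         line = line.strip()
--
--         if line.startswith('SLIDE '):
--             # Save previous slide
--             if current_slide:
--                 slide_text = '\n'.join(current_slide).strip()
--                 if slide_text:  # Only add non-empty slides
--                     slides.append(slide_text)
--                 current_slide = []
--         elif line and not line.startswith('SLIDE '):
--             # Check if this line contains unwanted phrases
--             line_lower = line.lower()
--             contains_unwanted = any(phrase in line_lower for phrase in unwanted_phrases)
--
--             # Skip lines that are clearly commentary/meta-text
--             if not contains_unwanted and not line.startswith('*') and not line.startswith('[') and not line.startswith('Note:'):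
--                 current_slide.append(line)
--
--     # Save last slide
--     if current_slide:
--         slide_text = '\n'.join(current_slide).strip()
--         if slide_text:  # Only add non-empty slides
--             slides.append(slide_text)
--
--     return slides
-- ===== SOURCE B (Python) =====
-- def _parse_optimized_content(content_text: str) -> list[str]:
--     """Parse GPT response into slide texts, filtering out unwanted content.
--
--     Two-phase pipeline: split into stripped lines and group them into segments
--     at each 'SLIDE ' marker, then filter/join/strip each segment.
--     """
--     unwanted_phrases = [
--         "here's your carousel",
--         "i'll create",
--         "let me craft",
--         "here are the slides",
--         "i've created",
--         "this carousel",
--         "here's how",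
--         "let's break this down",
--         "i've optimized",
--         "here's the content",
--         "based on your request"
--     ]
--
--     def keep(line: str) -> bool:
--         if not line:
--             return False
--         low = line.lower()
--         if any(p in low for p in unwanted_phrases):
--             return False
--         return not (line.startswith('*') or line.startswith('[') or line.startswith('Note:'))
--
--     lines = [l.strip() for l in content_text.split('\n')]
--
--     # Phase 1: group into segments; every 'SLIDE ' marker starts a new segment.
--     segments = [[]]
--     for line in lines:
--         if line.startswith('SLIDE '):
--             segments.append([])
--         else:
--             segments[-1].append(line)
--
--     # Phase 2: filter, join and strip each segment; keep non-empty results.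
--     slides = []
--     for seg in segments:
--         text = '\n'.join(l for l in seg if keep(l)).strip()
--         if text:
--             slides.append(text)
--     return slides
-- ===== Notes on version B (the rewrite author's own statement) =====
-- stated objective: alternative
-- what changed: Replaces A's flush-on-marker state machine (current-slide buffer flushed at each 'SLIDE ' marker and at the end, with the flush code duplicated) by a two-phase pipeline: group the stripped lines into segments at each marker, then filter/join/strip each segment independently.
import Mathlib
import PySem

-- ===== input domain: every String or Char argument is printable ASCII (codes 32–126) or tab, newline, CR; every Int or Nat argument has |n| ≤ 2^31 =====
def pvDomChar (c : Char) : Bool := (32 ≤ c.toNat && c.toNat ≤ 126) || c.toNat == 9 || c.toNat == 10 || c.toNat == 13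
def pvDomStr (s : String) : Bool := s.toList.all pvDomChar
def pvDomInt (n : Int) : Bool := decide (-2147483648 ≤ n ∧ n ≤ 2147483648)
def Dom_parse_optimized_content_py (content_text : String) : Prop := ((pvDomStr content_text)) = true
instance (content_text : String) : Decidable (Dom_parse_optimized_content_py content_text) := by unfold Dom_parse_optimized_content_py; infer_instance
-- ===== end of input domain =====

-- B replaces A's flush-on-marker state machine by a group-then-filter-then-join pipeline (alternative decomposition, same cost).

-- shared constant: the unwanted-phrase list (identical literal in both Pythons)
def pvUnwanted : List String :=
  ["here's your carousel", "i'll create", "let me craft", "here are the slides",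
   "i've created", "this carousel", "here's how", "let's break this down",
   "i've optimized", "here's the content", "based on your request"]

-- content_text.split('\n'); the separator is the non-empty constant '\n', so split? never returns none
def pvSplitLines (s : String) : List String := (PySem.Str.split? s "\n").getD []

-- ===== PORT A =====
-- A's loop body on the already-stripped line; state = (slides, current_slide)
def pvStepA (st : List String × List String) (line : String) : List String × List String :=
  if PySem.Str.startswith line "SLIDE " then
    if st.2 = [] then st
    else
      let slide_text := PySem.Str.strip (PySem.Str.join "\n" st.2)
      if slide_text = "" then (st.1, []) else (st.1 ++ [slide_text], [])
  else if !(line == "") && !(PySem.Str.startswith line "SLIDE ") then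
    let line_lower := PySem.Str.lower line
    let contains_unwanted := pvUnwanted.any (fun p => PySem.Str.isIn p line_lower)
    if !contains_unwanted && !(PySem.Str.startswith line "*")
        && !(PySem.Str.startswith line "[") && !(PySem.Str.startswith line "Note:") then
      (st.1, st.2 ++ [line])
    else st
  else st

def parse_optimized_content_py (content_text : String) : List String :=
  let lines := pvSplitLines content_text
  let st := lines.foldl (fun st raw => pvStepA st (PySem.Str.strip raw)) ([], [])
  if st.2 = [] then st.1
  else
    let slide_text := PySem.Str.strip (PySem.Str.join "\n" st.2)
    if slide_text = "" then st.1 else st.1 ++ [slide_text]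

-- ===== PORT B =====
-- B's per-line filter predicate
def pvKeep (line : String) : Bool :=
  if line == "" then false
  else if pvUnwanted.any (fun p => PySem.Str.isIn p (PySem.Str.lower line)) then false
  else !(PySem.Str.startswith line "*" || PySem.Str.startswith line "["
         || PySem.Str.startswith line "Note:")

-- segments[-1].append(line)
def pvAppendLast : List (List String) → String → List (List String)
  | [], l => [[l]]
  | [s], l => [s ++ [l]]
  | s :: t :: rest, l => s :: pvAppendLast (t :: rest) l

-- Phase-1 loop body: a 'SLIDE ' marker opens a new segment, other lines join the last one
def pvStepB (segs : List (List String)) (line : String) : List (List String) :=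
  if PySem.Str.startswith line "SLIDE " then segs ++ [[]]
  else pvAppendLast segs line

-- Phase-2 loop body: filter, join and strip a segment; keep the result if non-empty
def pvEmit (slides : List String) (seg : List String) : List String :=
  let text := PySem.Str.strip (PySem.Str.join "\n" (seg.filter pvKeep))
  if text = "" then slides else slides ++ [text]

def parse_optimized_content_py_alt (content_text : String) : List String :=
  let lines := (pvSplitLines content_text).map PySem.Str.strip
  let segments := lines.foldl pvStepB [[]]
  segments.foldl pvEmit []

-- ===== PRECONDITION & SPEC =====
def Spec_parse_optimized_content_py (content_text : String) (out : List String) : Prop := out = parse_optimized_content_py_alt content_text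
instance (content_text : String) (out : List String) : Decidable (Spec_parse_optimized_content_py content_text out) := by unfold Spec_parse_optimized_content_py; infer_instance

-- ===== CLAIM (what is proved, stated in full; the proofs are below) =====
def Claim_equal_parse_optimized_content_py : Prop := ∀ (content_text : String), Dom_parse_optimized_content_py content_text → Spec_parse_optimized_content_py content_text (parse_optimized_content_py content_text)

-- ===== LEMMAS AND PROOFS =====

-- A's trailing flush, as a function of the final state
def pvFinish (st : List String × List String) : List String :=
  if st.2 = [] then st.1
  else
    let slide_text := PySem.Str.strip (PySem.Str.join "\n" st.2)
    if slide_text = "" then st.1 else st.1 ++ [slide_text]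

lemma pvFinish_filter_eq_emit (slides pend : List String) :
    pvFinish (slides, pend.filter pvKeep) = pvEmit slides pend := by
  unfold pvFinish pvEmit
  cases h : pend.filter pvKeep with
  | nil =>
    have hj : PySem.Str.strip (PySem.Str.join "\n" ([] : List String)) = "" := by decide
    simp [h, hj]
  | cons a t => simp [h]

lemma pvAppendLast_ne_nil (segs : List (List String)) (l : String) :
    pvAppendLast segs l ≠ [] := by
  match segs with
  | [] => simp [pvAppendLast]
  | [s] => simp [pvAppendLast]
  | s :: t :: rest => simp [pvAppendLast]

lemma pvAppendLast_append (d s : List (List String)) (l : String) (hs : s ≠ []) :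
    pvAppendLast (d ++ s) l = d ++ pvAppendLast s l := by
  induction d with
  | nil => rfl
  | cons a d ih =>
    cases hd : d ++ s with
    | nil => exact absurd ((List.append_eq_nil_iff.mp hd).2) hs
    | cons b t =>
      simp only [List.cons_append, hd, pvAppendLast]
      rw [← hd, ih]

lemma pvStepB_fold_append (ls : List String) (d s : List (List String)) (hs : s ≠ []) :
    ls.foldl pvStepB (d ++ s) = d ++ ls.foldl pvStepB s := by
  induction ls generalizing d s with
  | nil => rfl
  | cons l ls ih =>
    simp only [List.foldl_cons]
    by_cases h : PySem.Str.startswith l "SLIDE " = true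
    · simp only [pvStepB, h, if_true, List.append_assoc]
      exact ih _ _ (by simp)
    · simp only [pvStepB, h, if_false, Bool.false_eq_true]
      rw [pvAppendLast_append d s l hs]
      exact ih _ _ (pvAppendLast_ne_nil s l)

lemma pvStepA_marker (st : List String × List String) (l : String)
    (h : PySem.Str.startswith l "SLIDE " = true) :
    pvStepA st l = (pvFinish st, []) := by
  obtain ⟨slides, cur⟩ := st
  unfold pvStepA pvFinish
  rw [if_pos h]
  cases cur with
  | nil => rfl
  | cons a t =>
    rw [if_neg (List.cons_ne_nil a t), if_neg (List.cons_ne_nil a t)]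
    by_cases hsj : PySem.Str.strip (PySem.Str.join "\n" (a :: t)) = "" <;> simp [hsj]

set_option maxHeartbeats 1000000 in
lemma pvStepA_nonmarker (slides pend : List String) (l : String)
    (h : PySem.Str.startswith l "SLIDE " = false) :
    pvStepA (slides, pend.filter pvKeep) l = (slides, (pend ++ [l]).filter pvKeep) := by
  rw [List.filter_append]
  unfold pvStepA pvKeep
  simp only [h, Bool.false_eq_true, if_false, Bool.not_false, Bool.and_true,
    List.filter_cons, List.filter_nil]
  cases he : (l == "") <;>
    cases hu : pvUnwanted.any (fun p => PySem.Str.isIn p (PySem.Str.lower l)) <;>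
      cases h1 : PySem.Str.startswith l "*" <;>
        cases h2 : PySem.Str.startswith l "[" <;>
          cases h3 : PySem.Str.startswith l "Note:" <;>
            simp only [he, hu, h1, h2, h3, Bool.not_true, Bool.not_false, Bool.and_true,
              Bool.and_false, Bool.false_and, Bool.true_and, Bool.or_true, Bool.or_false,
              Bool.false_or, Bool.true_or, Bool.false_eq_true, Bool.true_eq_false,
              if_true, if_false, List.append_nil]

lemma pvMain (ls : List String) (slides pend : List String) :
    pvFinish (ls.foldl pvStepA (slides, pend.filter pvKeep))
      = (ls.foldl pvStepB [pend]).foldl pvEmit slides := by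
  induction ls generalizing slides pend with
  | nil => simpa using pvFinish_filter_eq_emit slides pend
  | cons l ls ih =>
    simp only [List.foldl_cons]
    by_cases h : PySem.Str.startswith l "SLIDE " = true
    · have hsB : pvStepB [pend] l = [pend] ++ [[]] := by simp only [pvStepB, h, if_true]
      rw [pvStepA_marker _ _ h, pvFinish_filter_eq_emit, hsB,
        pvStepB_fold_append ls [pend] [[]] (by simp), List.foldl_append]
      simpa using ih (pvEmit slides pend) []
    · have h' : PySem.Str.startswith l "SLIDE " = false := by simpa using h
      have hsB : pvStepB [pend] l = [pend ++ [l]] := by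
        simp only [pvStepB, h', Bool.false_eq_true, if_false, pvAppendLast]
      rw [pvStepA_nonmarker slides pend l h', hsB]
      exact ih slides (pend ++ [l])

-- ===== VERDICT (by name: the statement is the Claim_ definition above) =====
theorem parse_optimized_content_py_spec : Claim_equal_parse_optimized_content_py := by
  intro c _
  show parse_optimized_content_py c = parse_optimized_content_py_alt c
  change pvFinish ((pvSplitLines c).foldl (fun st raw => pvStepA st (PySem.Str.strip raw)) ([], [])) =
    (((pvSplitLines c).map PySem.Str.strip).foldl pvStepB [[]]).foldl pvEmit []
  rw [← List.foldl_map]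
  exact pvMain _ [] []
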